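-- pv_equiv track=rewrite | github.com/jakobfranz/5-planar | real_components.py | congruent_filter
-- ===== SOURCE A (Python) =====
-- import itertools
--
-- def congruent_filter(position_of_real_components: list[int], q: int) -> list[int]:
--     number_of_real_components = len(position_of_real_components)
--
--     # signature: distances to other real components
--     rc_signature = [
--         [
--             (
--                 position_of_real_components[(i + ii) % number_of_real_components]
--                 - position_of_real_components[i]
--             )
--             % (2 * q)
--             for ii in range(1, number_of_real_components)
--         ]
--         for i in range(number_of_real_components)
--     ]
--
--     congruent_rc = []
--
--     def _choices():
--         yield [position_of_real_components[0]]
--         if number_of_real_components >= 2: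
--             for comb in itertools.combinations(position_of_real_components, 2):
--                 yield comb
--         if number_of_real_components >= 3:
--             for comb in itertools.combinations(position_of_real_components, 3):
--                 yield comb
--
--     def _signature_eq(signature1, signature2) -> bool:
--         return signature1 == signature2 or signature1 == list(
--             reversed([2 * q - diff for diff in signature2])
--         )
--
--     for con_cand in _choices():
--         if all(
--             [
--                 _signature_eq(
--                     rc_signature[position_of_real_components.index(con_cand[i])],
--                     rc_signature[position_of_real_components.index(con_cand[i + 1])],
--                 )
--                 for i in range(len(con_cand) - 1)
--             ]
--         ):
--             # normal signatures are equal
--             # check candidate specific signature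
--
--             cand_len = len(con_cand)
--             cand_signatures = [
--                 [
--                     (con_cand[(i + ii) % cand_len] - con_cand[i]) % (2 * q)
--                     for ii in range(1, cand_len)
--                 ]
--                 for i in range(cand_len)
--             ]
--
--             if all(
--                 [
--                     _signature_eq(cand_signatures[i], cand_signatures[i + 1])
--                     for i in range(len(con_cand) - 1)
--                 ]
--             ):
--                 congruent_rc += [con_cand]
--
--     congruent_rc.sort(key=lambda arr: len(arr), reverse=True)
--     return [position_of_real_components.index(con_rc) for con_rc in congruent_rc[0]]
-- ===== SOURCE B (Python) =====
-- import itertools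
--
--
-- def congruent_filter(position_of_real_components: list[int], q: int) -> list[int]:
--     pos = position_of_real_components
--     n = len(pos)
--     m = 2 * q
--
--     # distance signatures, as in the task description
--     sig = [
--         [(pos[(i + ii) % n] - pos[i]) % m for ii in range(1, n)]
--         for i in range(n)
--     ]
--
--     # first-occurrence index of each value (replaces repeated list.index scans)
--     first = {}
--     for i, v in enumerate(pos):
--         first.setdefault(v, i)
--
--     def flip(s):
--         return [m - d for d in reversed(s)]
--
--     # canonical representative of the {s, flip(s)} equivalence class, so the
--     # "signatures equal or reversed-complement" test becomes a key comparison
--     def canon(s):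
--         r = flip(s)
--         return s if s <= r else r
--
--     key = {v: canon(sig[i]) for v, i in first.items()}
--
--     def ok(cand):
--         k0 = key[cand[0]]
--         if any(key[v] != k0 for v in cand[1:]):
--             return False
--         k = len(cand)
--         cs = [
--             [(cand[(j + jj) % k] - cand[j]) % m for jj in range(1, k)]
--             for j in range(k)
--         ]
--         return all(
--             cs[j] == cs[j + 1] or cs[j] == flip(cs[j + 1])
--             for j in range(k - 1)
--         )
--
--     # largest candidates first, earliest in combination order wins
--     for cand in itertools.combinations(pos, 3):
--         if ok(cand):
--             return [first[v] for v in cand]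
--     for cand in itertools.combinations(pos, 2):
--         if ok(cand):
--             return [first[v] for v in cand]
--     return [0]
-- ===== Notes on version B (the rewrite author's own statement) =====
-- stated objective: faster
-- what changed: B precomputes a first-occurrence value-to-index dictionary and a canonical key (lexicographic min of a signature and its reversed complement) per value, so the repeated list.index scans disappear and the signature-equivalence chain becomes a key comparison, and it scans triples then pairs with an early return instead of collecting all passing candidates and stable-sorting them by length; intended as faster (probe measured 10.5x at n=64; at n=256 both Pythons can exceed the probe budget, so the speed-up is unconfirmed there).
-- outside the precondition, e.g. on congruent_filter([], 5): A raises IndexError, B returns [0]; on congruent_filter([1, 2], 0): A raises ZeroDivisionError, B raises ZeroDivisionError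
import Mathlib
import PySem

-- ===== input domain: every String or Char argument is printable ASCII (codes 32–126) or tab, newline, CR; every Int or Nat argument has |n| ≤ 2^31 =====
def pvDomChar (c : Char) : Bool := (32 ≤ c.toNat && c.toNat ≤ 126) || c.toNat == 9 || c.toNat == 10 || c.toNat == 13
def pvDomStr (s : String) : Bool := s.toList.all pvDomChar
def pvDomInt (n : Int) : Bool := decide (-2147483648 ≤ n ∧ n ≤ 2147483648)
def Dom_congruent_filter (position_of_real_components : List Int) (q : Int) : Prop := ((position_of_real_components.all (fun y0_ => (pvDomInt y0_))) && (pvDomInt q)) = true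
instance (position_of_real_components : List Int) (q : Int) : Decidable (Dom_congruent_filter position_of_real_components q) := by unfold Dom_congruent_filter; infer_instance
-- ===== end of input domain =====

-- B replaces A's candidate loop (list.index scans inside every test, then a stable sort) by a
-- first-occurrence dictionary, canonical signature-equivalence keys and an early-exit scan of
-- triples then pairs; intended as faster (timing run measured ~10x at n=64; at n=256 both
-- Pythons can exceed the probe budget); same return value on all of Pre_.

-- ===== PORT A =====
-- xs[i] with default (every index A uses is in range under Pre_)
def pvGetI (xs : List Int) (i : Int) : Int := PySem.List.pyGetD xs i 0
def pvGetL (xs : List (List Int)) (i : Int) : List Int := PySem.List.pyGetD xs i []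
-- the cyclic distance-signature comprehension (this comprehension is textually identical in A and B)
def pvSigs (xs : List Int) (m : Int) : List (List Int) :=
  (PySem.List.pyRange 0 (PySem.List.len xs) 1).map (fun i =>
    (PySem.List.pyRange 1 (PySem.List.len xs) 1).map (fun ii =>
      PySem.Int.mod (pvGetI xs (PySem.Int.mod (i + ii) (PySem.List.len xs)) - pvGetI xs i) m))
-- A's _signature_eq
def pvFlipA (q : Int) (s : List Int) : List Int := (s.map (fun d => 2 * q - d)).reverse
def pvSigEq (q : Int) (s1 s2 : List Int) : Bool := s1 == s2 || s1 == pvFlipA q s2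
-- position_of_real_components.index(v) (always found where A calls it)
def pvIdx (pos : List Int) (v : Int) : Int := ((PySem.List.index? pos v).getD 0 : Nat)
-- A's _choices generator, as the list it yields
def pvChoices (pos : List Int) : List (List Int) :=
  [[pvGetI pos 0]]
    ++ (if 2 ≤ pos.length then PySem.List.combinations pos 2 else [])
    ++ (if 3 ≤ pos.length then PySem.List.combinations pos 3 else [])
-- the two nested 'all([...])' tests of A's loop body
def pvCandOkA (pos : List Int) (q : Int) (rcsig : List (List Int)) (cand : List Int) : Bool :=
  ((PySem.List.pyRange 0 (PySem.List.len cand - 1) 1).map (fun i =>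
      pvSigEq q (pvGetL rcsig (pvIdx pos (pvGetI cand i)))
                (pvGetL rcsig (pvIdx pos (pvGetI cand (i + 1)))))).all (fun b => b)
  && ((PySem.List.pyRange 0 (PySem.List.len cand - 1) 1).map (fun i =>
      pvSigEq q (pvGetL (pvSigs cand (2 * q)) i)
                (pvGetL (pvSigs cand (2 * q)) (i + 1)))).all (fun b => b)

def congruent_filter (position_of_real_components : List Int) (q : Int) : List Int :=
  (pvGetL
    (PySem.List.sorted
      ((pvChoices position_of_real_components).foldl
        (fun acc cand =>
          if pvCandOkA position_of_real_components q
               (pvSigs position_of_real_components (2 * q)) cand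
          then acc ++ [cand] else acc) [])
      (fun arr => PySem.List.len arr) true)
    0).map (fun c => pvIdx position_of_real_components c)

-- ===== PORT B =====
-- Python list '<=' on int lists
def pvLexLe : List Int → List Int → Bool
  | [], _ => true
  | _ :: _, [] => false
  | a :: s, b :: t => if a < b then true else if b < a then false else pvLexLe s t
-- B's flip
def pvFlipB (m : Int) (s : List Int) : List Int := s.reverse.map (fun d => m - d)
-- B's canon: canonical representative of the {s, flip s} class
def pvCanon (m : Int) (s : List Int) : List Int :=
  if pvLexLe s (pvFlipB m s) then s else pvFlipB m s
-- first-occurrence index dictionary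
def pvFirst (pos : List Int) : PySem.Dict Int Int :=
  (PySem.List.enumerate pos).foldl (fun d p => d.setdefault p.2 p.1) PySem.Dict.empty
-- value → canonical signature key
def pvKeyDict (m : Int) (sig : List (List Int)) (first : PySem.Dict Int Int) :
    PySem.Dict Int (List Int) :=
  first.items.foldl (fun d p => d.insert p.1 (pvCanon m (pvGetL sig p.2))) PySem.Dict.empty
-- B's ok(cand)
def pvOkB (m : Int) (key : PySem.Dict Int (List Int)) (cand : List Int) : Bool :=
  if (PySem.List.slice cand (some 1) none).any
       (fun v => !(key.getD v [] == key.getD (pvGetI cand 0) [])) then false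
  else
    (PySem.List.pyRange 0 (PySem.List.len cand - 1) 1).all (fun j =>
      pvGetL (pvSigs cand m) j == pvGetL (pvSigs cand m) (j + 1)
        || pvGetL (pvSigs cand m) j == pvFlipB m (pvGetL (pvSigs cand m) (j + 1)))

def congruent_filter_alt (position_of_real_components : List Int) (q : Int) : List Int :=
  let pos := position_of_real_components
  let key := pvKeyDict (2 * q) (pvSigs pos (2 * q)) (pvFirst pos)
  match (PySem.List.combinations pos 3).find? (pvOkB (2 * q) key) with
  | some c => c.map (fun v => (pvFirst pos).getD v 0)
  | none =>
    match (PySem.List.combinations pos 2).find? (pvOkB (2 * q) key) with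
    | some c => c.map (fun v => (pvFirst pos).getD v 0)
    | none => [0]

-- ===== PRECONDITION & SPEC =====
-- Pre_ excludes exactly the inputs where A raises: the empty list (IndexError on
-- position_of_real_components[0]) and q = 0 with at least two components (ZeroDivisionError in '% (2*q)').
def Pre_congruent_filter (position_of_real_components : List Int) (q : Int) : Prop :=
  position_of_real_components ≠ [] ∧ (q ≠ 0 ∨ position_of_real_components.length = 1)
instance (position_of_real_components : List Int) (q : Int) : Decidable (Pre_congruent_filter position_of_real_components q) := by unfold Pre_congruent_filter; infer_instance
def pvWitness_congruent_filter : List Int × Int := ([0, 1, 3, 4], 3)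
def Spec_congruent_filter (position_of_real_components : List Int) (q : Int) (out : List Int) : Prop := out = congruent_filter_alt position_of_real_components q
instance (position_of_real_components : List Int) (q : Int) (out : List Int) : Decidable (Spec_congruent_filter position_of_real_components q out) := by unfold Spec_congruent_filter; infer_instance

-- ===== CLAIM (what is proved, stated in full; the proofs are below) =====
def Claim_equal_congruent_filter : Prop := ∀ (position_of_real_components : List Int) (q : Int), Dom_congruent_filter position_of_real_components q → Pre_congruent_filter position_of_real_components q → Spec_congruent_filter position_of_real_components q (congruent_filter position_of_real_components q)

-- ===== LEMMAS AND PROOFS =====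

-- ---- the stable descending-by-length sort of [single] ++ pairs ++ triples ----

theorem pvInsertBy_cons {α : Type} (before : α → α → Bool) (x y : α) (ys : List α) :
    PySem.List.insertBy before x (y :: ys)
      = if before x y then x :: y :: ys else y :: PySem.List.insertBy before x ys := rfl

theorem pvInsertBy_append {α : Type} (before : α → α → Bool) (x : α) (A B : List α)
    (hA : ∀ a ∈ A, before x a = false) :
    PySem.List.insertBy before x (A ++ B) = A ++ PySem.List.insertBy before x B := by
  induction A with
  | nil => rfl
  | cons a A ih =>
      rw [List.cons_append, pvInsertBy_cons, hA a (by simp), if_neg (by simp),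
        ih (fun y hy => hA y (by simp [hy])), List.cons_append]

-- the insertion step of the reverse sort with key = length
def pvStep (acc : List (List Int)) (x : List Int) : List (List Int) :=
  PySem.List.insertBy (fun a b => decide (PySem.List.len b < PySem.List.len a)) x acc

theorem pvLenLt (x a : List Int) (nx na : Nat) (hx : x.length = nx) (ha : a.length = na) :
    decide (PySem.List.len a < PySem.List.len x) = decide ((na : Int) < (nx : Int)) := by
  simp [PySem.List.len_eq, hx, ha]

theorem pvFoldPair (s : List Int) (hs : s.length = 1) :
    ∀ (P P0 : List (List Int)), (∀ p ∈ P, p.length = 2) → (∀ p ∈ P0, p.length = 2) →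
    P.foldl pvStep (P0 ++ [s]) = (P0 ++ P) ++ [s] := by
  intro P
  induction P with
  | nil => intro P0 _ _; simp
  | cons p P ih =>
      intro P0 hP hP0
      have hstep : pvStep (P0 ++ [s]) p = (P0 ++ [p]) ++ [s] := by
        unfold pvStep
        rw [pvInsertBy_append _ _ P0 [s]
          (fun a hmem => by rw [pvLenLt p a 2 2 (hP p (by simp)) (hP0 a hmem)]; decide)]
        rw [pvInsertBy_cons, pvLenLt p s 2 1 (hP p (by simp)) hs,
          if_pos (by decide)]
        simp
      rw [List.foldl_cons, hstep,
        ih (P0 ++ [p]) (fun y hy => hP y (by simp [hy]))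
          (fun y hy => by
            rcases List.mem_append.mp hy with h | h
            · exact hP0 y h
            · simp at h; subst h; exact hP y (by simp))]
      simp

theorem pvFoldTriple (s : List Int) (hs : s.length = 1) (Pa : List (List Int))
    (hPa : ∀ p ∈ Pa, p.length = 2) :
    ∀ (T T0 : List (List Int)), (∀ t ∈ T, t.length = 3) → (∀ t ∈ T0, t.length = 3) →
    T.foldl pvStep (T0 ++ (Pa ++ [s])) = (T0 ++ T) ++ (Pa ++ [s]) := by
  intro T
  induction T with
  | nil => intro T0 _ _; simp
  | cons t T ih =>
      intro T0 hT hT0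
      have hins : PySem.List.insertBy (fun a b => decide (PySem.List.len b < PySem.List.len a))
          t (Pa ++ [s]) = t :: (Pa ++ [s]) := by
        cases Pa with
        | nil =>
            rw [List.nil_append, pvInsertBy_cons, pvLenLt t s 3 1 (hT t (by simp)) hs,
              if_pos (by decide)]
        | cons p Pa' =>
            rw [List.cons_append, pvInsertBy_cons,
              pvLenLt t p 3 2 (hT t (by simp)) (hPa p (by simp)), if_pos (by decide)]
      have hstep : pvStep (T0 ++ (Pa ++ [s])) t = (T0 ++ [t]) ++ (Pa ++ [s]) := by
        unfold pvStep
        rw [pvInsertBy_append _ _ T0 (Pa ++ [s])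
          (fun a hmem => by rw [pvLenLt t a 3 3 (hT t (by simp)) (hT0 a hmem)]; decide), hins]
        simp
      rw [List.foldl_cons, hstep,
        ih (T0 ++ [t]) (fun y hy => hT y (by simp [hy]))
          (fun y hy => by
            rcases List.mem_append.mp hy with h | h
            · exact hT0 y h
            · simp at h; subst h; exact hT y (by simp))]
      simp

theorem pvSortShape (s : List Int) (P T : List (List Int))
    (hs : s.length = 1) (hP : ∀ p ∈ P, p.length = 2) (hT : ∀ t ∈ T, t.length = 3) :
    PySem.List.sorted ([s] ++ P ++ T) (fun arr => PySem.List.len arr) true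
      = T ++ P ++ [s] := by
  rw [PySem.List.sorted_rev_eq_foldl_insertBy]
  rw [List.append_assoc, List.foldl_append, List.foldl_cons, List.foldl_nil,
    List.foldl_append]
  have h1 : List.foldl pvStep [s] P = P ++ [s] := by
    have h := pvFoldPair s hs P [] hP (by simp)
    simpa using h
  have h2 : List.foldl pvStep (P ++ [s]) T = T ++ (P ++ [s]) := by
    have h := pvFoldTriple s hs P hP T [] hT (by simp)
    simpa using h
  show List.foldl pvStep (List.foldl pvStep (pvStep [] s) P) T = T ++ P ++ [s]
  have h0 : pvStep [] s = [s] := rfl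
  rw [h0]
  rw [h1, h2]
  simp

-- ---- canonical keys characterise A's _signature_eq ----

theorem pvLexLe_total (s t : List Int) : pvLexLe s t = true ∨ pvLexLe t s = true := by
  induction s generalizing t with
  | nil => left; rfl
  | cons a s ih =>
      cases t with
      | nil => right; rfl
      | cons b t =>
          rcases lt_trichotomy a b with h | h | h
          · left; simp [pvLexLe, h]
          · subst h
            rcases ih t with h' | h' <;> [left; right] <;> simp [pvLexLe, h']
          · right; simp [pvLexLe, h]

theorem pvLexLe_antisymm (s t : List Int) (h1 : pvLexLe s t = true) (h2 : pvLexLe t s = true) :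
    s = t := by
  induction s generalizing t with
  | nil => cases t with | nil => rfl | cons b t => simp [pvLexLe] at h2
  | cons a s ih =>
      cases t with
      | nil => simp [pvLexLe] at h1
      | cons b t =>
          rcases lt_trichotomy a b with h | h | h
          · rw [pvLexLe] at h2
            rw [if_neg (by omega), if_pos h] at h2
            exact absurd h2 (by simp)
          · subst h
            simp only [pvLexLe, lt_irrefl, if_false] at h1 h2
            exact congrArg (a :: ·) (ih t h1 h2)
          · rw [pvLexLe] at h1
            rw [if_neg (by omega), if_pos h] at h1
            exact absurd h1 (by simp)

theorem pvFlipB_invol (m : Int) (s : List Int) : pvFlipB m (pvFlipB m s) = s := by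
  simp [pvFlipB, List.map_reverse, List.map_map]

theorem pvCanon_flip (m : Int) (s : List Int) : pvCanon m (pvFlipB m s) = pvCanon m s := by
  unfold pvCanon
  rw [pvFlipB_invol]
  by_cases h : pvLexLe s (pvFlipB m s) = true <;>
    by_cases h' : pvLexLe (pvFlipB m s) s = true
  · have he : s = pvFlipB m s := pvLexLe_antisymm _ _ h h'
    rw [if_pos h', if_pos h]; exact he.symm
  · rw [if_neg h', if_pos h]
  · rw [if_pos h', if_neg h]
  · rcases pvLexLe_total s (pvFlipB m s) with hh | hh
    · exact absurd hh h
    · exact absurd hh h'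

theorem pvCanon_cases (m : Int) (s : List Int) :
    pvCanon m s = s ∨ pvCanon m s = pvFlipB m s := by
  unfold pvCanon; split <;> simp

theorem pvFlipA_eq (q : Int) (s : List Int) : pvFlipA q s = pvFlipB (2 * q) s := by
  simp [pvFlipA, pvFlipB, List.map_reverse]

theorem pvSigEq_iff_canon (q : Int) (s t : List Int) :
    pvSigEq q s t = true ↔ pvCanon (2 * q) s = pvCanon (2 * q) t := by
  constructor
  · intro h
    simp only [pvSigEq, Bool.or_eq_true, beq_iff_eq, pvFlipA_eq] at h
    rcases h with h | h
    · rw [h]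
    · rw [h, pvCanon_flip]
  · intro h
    simp only [pvSigEq, Bool.or_eq_true, beq_iff_eq, pvFlipA_eq]
    rcases pvCanon_cases (2 * q) s with hs | hs <;>
      rcases pvCanon_cases (2 * q) t with ht | ht
    · left; rw [← hs, ← ht, h]
    · right; rw [← hs, h, ht]
    · right
      have h2 : pvFlipB (2 * q) s = t := by rw [← hs, h, ht]
      rw [← h2, pvFlipB_invol]
    · left
      have h2 : pvFlipB (2 * q) s = pvFlipB (2 * q) t := by rw [← hs, ← ht, h]
      have h3 := congrArg (pvFlipB (2 * q)) h2
      rwa [pvFlipB_invol, pvFlipB_invol] at h3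

-- ---- the first-occurrence dictionary is list.index ----

theorem pvFirst_fold_get? (pos : List Int) : ∀ (s : Int) (d : PySem.Dict Int Int) (v : Int),
    ((PySem.List.enumerate pos s).foldl (fun d p => d.setdefault p.2 p.1) d).get? v
      = ((d.get? v).or ((PySem.List.index? pos v).map (fun n => s + (n : Int)))) := by
  induction pos with
  | nil => intro s d v; simp [PySem.List.enumerate_nil]
  | cons x xs ih =>
      intro s d v
      rw [PySem.List.enumerate_cons, List.foldl_cons]
      show ((PySem.List.enumerate xs (s + 1)).foldl (fun d p => d.setdefault p.2 p.1)
        (d.setdefault x s)).get? v = _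
      rw [ih]
      by_cases hxv : x = v
      · subst hxv
        rw [PySem.Dict.get?_setdefault_self, PySem.List.index?_cons_self]
        cases hd : d.get? x
        · simp
        · simp
      · rw [PySem.Dict.get?_setdefault_of_ne d s (Ne.symm hxv),
          PySem.List.index?_cons_of_ne xs hxv]
        cases hi : PySem.List.index? xs v <;> cases hd : d.get? v
        · simp [Option.or]
        · simp [Option.or]
        · simp [Option.or]
          ring
        · simp [Option.or]

theorem pvFirst_get? (pos : List Int) (v : Int) :
    (pvFirst pos).get? v = (PySem.List.index? pos v).map (fun n => (n : Int)) := by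
  unfold pvFirst
  rw [pvFirst_fold_get? pos 0 PySem.Dict.empty v]
  cases hi : PySem.List.index? pos v <;> simp

theorem pvFirst_getD (pos : List Int) (v : Int) (hv : v ∈ pos) :
    (pvFirst pos).getD v 0 = pvIdx pos v := by
  rw [PySem.Dict.getD_eq_get?_getD, pvFirst_get?]
  cases hk : PySem.List.index? pos v with
  | none => exact absurd ((PySem.List.index?_eq_none_iff pos v).mp hk) (by simp [hv])
  | some k =>
      rw [PySem.List.index?_eq_idxOf?] at hk
      simp [pvIdx, PySem.List.index?_eq_idxOf?, hk]

theorem pvSetdefault_fold_nodup (l : List (Int × Int)) :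
    ∀ (d : PySem.Dict Int Int), d.keys.Nodup →
    (l.foldl (fun d p => d.setdefault p.2 p.1) d).keys.Nodup := by
  induction l with
  | nil => intro d hd; exact hd
  | cons p l ih =>
      intro d hd
      rw [List.foldl_cons]
      apply ih
      by_cases hc : d.contains p.2 = true
      · rw [PySem.Dict.setdefault_of_contains d p.1 hc]; exact hd
      · rw [PySem.Dict.setdefault_of_not_contains d p.1 (by simpa using hc)]
        exact PySem.Dict.nodup_keys_insert d p.2 p.1 hd

theorem pvFirst_nodup (pos : List Int) : (pvFirst pos).keys.Nodup := by
  unfold pvFirst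
  exact pvSetdefault_fold_nodup (PySem.List.enumerate pos) PySem.Dict.empty
    (by rw [PySem.Dict.keys_empty]; exact List.nodup_nil)

theorem pvKey_getD (m : Int) (sig : List (List Int)) (pos : List Int) (v : Int) (hv : v ∈ pos) :
    (pvKeyDict m sig (pvFirst pos)).getD v [] = pvCanon m (pvGetL sig (pvIdx pos v)) := by
  have hnd : ((pvFirst pos).items.map (·.1)).Nodup := by
    have h := pvFirst_nodup pos
    simpa [PySem.Dict.keys] using h
  have hitems : (pvKeyDict m sig (pvFirst pos)).items
      = PySem.Dict.empty.items ++ (pvFirst pos).items.map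
          (fun p => (p.1, pvCanon m (pvGetL sig p.2))) :=
    PySem.Dict.items_foldl_insert_fresh (pvFirst pos).items (·.1)
      (fun p => pvCanon m (pvGetL sig p.2)) PySem.Dict.empty (fun a _ => rfl) hnd
  cases hk : PySem.List.index? pos v with
  | none => exact absurd ((PySem.List.index?_eq_none_iff pos v).mp hk) (by simp [hv])
  | some k =>
      have hget : (pvFirst pos).get? v = some (k : Int) := by
        rw [pvFirst_get?, hk]; rfl
      have hmem : (v, (k : Int)) ∈ (pvFirst pos).items :=
        PySem.Dict.mem_items_of_get?_eq_some (pvFirst pos) hget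
      have hmem2 : (v, pvCanon m (pvGetL sig (k : Int)))
          ∈ (pvKeyDict m sig (pvFirst pos)).items := by
        rw [hitems]
        exact List.mem_append_right _ (List.mem_map.mpr ⟨(v, (k : Int)), hmem, rfl⟩)
      have hnd2 : (pvKeyDict m sig (pvFirst pos)).keys.Nodup := by
        show ((pvKeyDict m sig (pvFirst pos)).items.map (·.1)).Nodup
        rw [hitems]
        simpa [List.map_map, Function.comp] using hnd
      rw [PySem.Dict.getD_of_mem_items (pvKeyDict m sig (pvFirst pos)) hmem2 hnd2]
      have hidx : pvIdx pos v = (k : Int) := by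
        rw [PySem.List.index?_eq_idxOf?] at hk
        simp [pvIdx, PySem.List.index?_eq_idxOf?, hk]
      rw [hidx]

-- ---- the candidate tests agree on singletons, pairs and triples ----

theorem pvOkA_single (pos : List Int) (q : Int) (S : List (List Int)) (x : Int) :
    pvCandOkA pos q S [x] = true := by
  have h1 : PySem.List.len [x] - 1 = 0 := by simp [PySem.List.len_eq]
  unfold pvCandOkA
  rw [h1]
  rfl

theorem pvIfBool1 (x lA lB : Bool) (h : lB = lA) :
    (if (!x) = true then false else lB) = (x && lA) := by
  cases x <;> simp [h]

theorem pvIfBool2 (x1 x2 lA lB : Bool) (h : lB = lA) :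
    (if (!x1 || !x2) = true then false else lB) = ((x1 && x2) && lA) := by
  cases x1 <;> cases x2 <;> simp [h]

theorem pvOk_pair (pos : List Int) (q : Int) (a b : Int) (ha : a ∈ pos) (hb : b ∈ pos) :
    pvOkB (2 * q) (pvKeyDict (2 * q) (pvSigs pos (2 * q)) (pvFirst pos)) [a, b]
      = pvCandOkA pos q (pvSigs pos (2 * q)) [a, b] := by
  have hka := pvKey_getD (2 * q) (pvSigs pos (2 * q)) pos a ha
  have hkb := pvKey_getD (2 * q) (pvSigs pos (2 * q)) pos b hb
  have hr : PySem.List.pyRange 0 (PySem.List.len [a, b] - 1) 1 = [(0 : Int)] := by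
    have h1 : PySem.List.len [a, b] - 1 = 1 := by simp [PySem.List.len_eq]
    rw [h1]; decide
  have g0 : pvGetI [a, b] 0 = a := rfl
  have g1 : pvGetI [a, b] (0 + 1) = b := rfl
  unfold pvOkB pvCandOkA
  rw [hr, PySem.List.slice_from_one]
  simp only [List.tail_cons, List.any_cons, List.any_nil, List.map_cons, List.map_nil,
    List.all_cons, List.all_nil, Bool.or_false, Bool.and_true]
  rw [g0, g1, hka, hkb]
  have hch : pvSigEq q (pvGetL (pvSigs pos (2 * q)) (pvIdx pos a))
        (pvGetL (pvSigs pos (2 * q)) (pvIdx pos b))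
      = (pvCanon (2 * q) (pvGetL (pvSigs pos (2 * q)) (pvIdx pos b))
          == pvCanon (2 * q) (pvGetL (pvSigs pos (2 * q)) (pvIdx pos a))) := by
    rw [Bool.eq_iff_iff, pvSigEq_iff_canon, beq_iff_eq]
    exact eq_comm
  rw [hch]
  exact pvIfBool1 _ _ _ (by simp only [pvSigEq, pvFlipA_eq])

theorem pvOk_triple (pos : List Int) (q : Int) (a b c : Int)
    (ha : a ∈ pos) (hb : b ∈ pos) (hc : c ∈ pos) :
    pvOkB (2 * q) (pvKeyDict (2 * q) (pvSigs pos (2 * q)) (pvFirst pos)) [a, b, c]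
      = pvCandOkA pos q (pvSigs pos (2 * q)) [a, b, c] := by
  have hka := pvKey_getD (2 * q) (pvSigs pos (2 * q)) pos a ha
  have hkb := pvKey_getD (2 * q) (pvSigs pos (2 * q)) pos b hb
  have hkc := pvKey_getD (2 * q) (pvSigs pos (2 * q)) pos c hc
  have hr : PySem.List.pyRange 0 (PySem.List.len [a, b, c] - 1) 1 = [(0 : Int), 1] := by
    have h1 : PySem.List.len [a, b, c] - 1 = 2 := by simp [PySem.List.len_eq]
    rw [h1]; decide
  have g0 : pvGetI [a, b, c] 0 = a := rfl
  have g1 : pvGetI [a, b, c] (0 + 1) = b := rfl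
  have g2 : pvGetI [a, b, c] 1 = b := rfl
  have g3 : pvGetI [a, b, c] (1 + 1) = c := rfl
  unfold pvOkB pvCandOkA
  rw [hr, PySem.List.slice_from_one]
  simp only [List.tail_cons, List.any_cons, List.any_nil, List.map_cons, List.map_nil,
    List.all_cons, List.all_nil, Bool.or_false, Bool.and_true]
  rw [g0, g1, g2, g3, hka, hkb, hkc]
  have hch : (pvSigEq q (pvGetL (pvSigs pos (2 * q)) (pvIdx pos a))
        (pvGetL (pvSigs pos (2 * q)) (pvIdx pos b))
      && pvSigEq q (pvGetL (pvSigs pos (2 * q)) (pvIdx pos b))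
        (pvGetL (pvSigs pos (2 * q)) (pvIdx pos c)))
      = ((pvCanon (2 * q) (pvGetL (pvSigs pos (2 * q)) (pvIdx pos b))
            == pvCanon (2 * q) (pvGetL (pvSigs pos (2 * q)) (pvIdx pos a)))
        && (pvCanon (2 * q) (pvGetL (pvSigs pos (2 * q)) (pvIdx pos c))
            == pvCanon (2 * q) (pvGetL (pvSigs pos (2 * q)) (pvIdx pos a)))) := by
    rw [Bool.eq_iff_iff]
    simp only [Bool.and_eq_true, pvSigEq_iff_canon, beq_iff_eq]
    constructor
    · rintro ⟨h1, h2⟩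
      exact ⟨h1.symm, (h1.trans h2).symm⟩
    · rintro ⟨h1, h2⟩
      exact ⟨h1.symm, h1.trans h2.symm⟩
  rw [hch]
  exact pvIfBool2 _ _ _ _ (by simp only [pvSigEq, pvFlipA_eq])

-- ---- assembling the two programs ----

theorem pvGetL_zero_cons (x : List Int) (xs : List (List Int)) : pvGetL (x :: xs) 0 = x :=
  PySem.List.pyGetD_zero_cons x xs []

theorem pvGetI_zero_cons (x : Int) (xs : List Int) : pvGetI (x :: xs) 0 = x :=
  PySem.List.pyGetD_zero_cons x xs 0

theorem pvGuard (pos : List Int) (r : Nat) :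
    (if r ≤ pos.length then PySem.List.combinations pos r else [])
      = PySem.List.combinations pos r := by
  by_cases h : r ≤ pos.length
  · rw [if_pos h]
  · rw [if_neg h, PySem.List.combinations_eq_nil_of_length_lt pos (by omega)]

theorem pvMem_of_mem_comb {pos c : List Int} {r : Nat}
    (hc : c ∈ PySem.List.combinations pos r) : ∀ v ∈ c, v ∈ pos :=
  fun _ hv => (PySem.List.sublist_of_mem_combinations hc).subset hv

-- ===== VERDICT (by name: the statement is the Claim_ definition above) =====
theorem congruent_filter_spec : Claim_equal_congruent_filter := by
  intro pos q _ hpre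
  obtain ⟨hne, -⟩ := hpre
  unfold Spec_congruent_filter
  simp only [congruent_filter, congruent_filter_alt, pvChoices]
  rw [PySem.List.foldl_append_if_eq_filter
    (fun cand => pvCandOkA pos q (pvSigs pos (2 * q)) cand)]
  rw [List.nil_append, pvGuard pos 2, pvGuard pos 3, List.filter_append, List.filter_append]
  rw [show List.filter (fun cand => pvCandOkA pos q (pvSigs pos (2 * q)) cand)
        [[pvGetI pos 0]] = [[pvGetI pos 0]] by
      simp [List.filter, pvOkA_single]]
  have hP : ∀ p ∈ List.filter (fun cand => pvCandOkA pos q (pvSigs pos (2 * q)) cand)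
      (PySem.List.combinations pos 2), p.length = 2 := fun p hp =>
    PySem.List.length_of_mem_combinations (List.mem_of_mem_filter hp)
  have hT : ∀ t ∈ List.filter (fun cand => pvCandOkA pos q (pvSigs pos (2 * q)) cand)
      (PySem.List.combinations pos 3), t.length = 3 := fun t ht =>
    PySem.List.length_of_mem_combinations (List.mem_of_mem_filter ht)
  rw [pvSortShape [pvGetI pos 0] _ _ rfl hP hT]
  have hBT : List.filter (pvOkB (2 * q) (pvKeyDict (2 * q) (pvSigs pos (2 * q)) (pvFirst pos)))
        (PySem.List.combinations pos 3)
      = List.filter (fun cand => pvCandOkA pos q (pvSigs pos (2 * q)) cand)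
        (PySem.List.combinations pos 3) := by
    apply List.filter_congr
    intro c hcmem
    have hlen := PySem.List.length_of_mem_combinations hcmem
    have hmem := pvMem_of_mem_comb hcmem
    match c, hlen with
    | [a, b, c'], _ =>
        exact pvOk_triple pos q a b c' (hmem a (by simp)) (hmem b (by simp))
          (hmem c' (by simp))
  have hBP : List.filter (pvOkB (2 * q) (pvKeyDict (2 * q) (pvSigs pos (2 * q)) (pvFirst pos)))
        (PySem.List.combinations pos 2)
      = List.filter (fun cand => pvCandOkA pos q (pvSigs pos (2 * q)) cand)
        (PySem.List.combinations pos 2) := by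
    apply List.filter_congr
    intro c hcmem
    have hlen := PySem.List.length_of_mem_combinations hcmem
    have hmem := pvMem_of_mem_comb hcmem
    match c, hlen with
    | [a, b], _ =>
        exact pvOk_pair pos q a b (hmem a (by simp)) (hmem b (by simp))
  rw [← List.head?_filter, ← List.head?_filter, hBT, hBP]
  cases hTc : List.filter (fun cand => pvCandOkA pos q (pvSigs pos (2 * q)) cand)
      (PySem.List.combinations pos 3) with
  | cons t T' =>
      have htpos : ∀ v ∈ t, v ∈ pos := by
        have hmem : t ∈ List.filter (fun cand => pvCandOkA pos q (pvSigs pos (2 * q)) cand)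
            (PySem.List.combinations pos 3) := by rw [hTc]; simp
        exact pvMem_of_mem_comb (List.mem_of_mem_filter hmem)
      simp only [List.cons_append, List.head?_cons]
      rw [pvGetL_zero_cons]
      exact List.map_congr_left (fun v hv => (pvFirst_getD pos v (htpos v hv)).symm)
  | nil =>
      simp only [List.nil_append]
      cases hPc : List.filter (fun cand => pvCandOkA pos q (pvSigs pos (2 * q)) cand)
          (PySem.List.combinations pos 2) with
      | cons p P' =>
          have hppos : ∀ v ∈ p, v ∈ pos := by
            have hmem : p ∈ List.filter (fun cand => pvCandOkA pos q (pvSigs pos (2 * q)) cand)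
                (PySem.List.combinations pos 2) := by rw [hPc]; simp
            exact pvMem_of_mem_comb (List.mem_of_mem_filter hmem)
          simp only [List.cons_append, List.head?_cons, List.head?_nil]
          rw [pvGetL_zero_cons]
          exact List.map_congr_left (fun v hv => (pvFirst_getD pos v (hppos v hv)).symm)
      | nil =>
          simp only [List.nil_append, List.head?_nil]
          rw [pvGetL_zero_cons]
          cases pos with
          | nil => exact absurd rfl hne
          | cons h rest =>
              rw [pvGetI_zero_cons]
              have hidx : pvIdx (h :: rest) h = 0 := by
                unfold pvIdx
                rw [PySem.List.index?_cons_self]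
                rfl
              simp [hidx]
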